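-- pv_equiv track=rewrite | github.com/daniMaarouf/SimpleScalar_tuner | create_graphs.py | assign_nums
-- ===== SOURCE A (Python) =====
-- def assign_nums(classes):
--     class_to_num = {}
--     class_nums = []
--     num = 0
--     for c in classes:
--         if not c in class_to_num:
--             class_to_num[c] = num
--             num += 1
--         class_nums.append(class_to_num[c])
--     return class_nums
-- ===== SOURCE B (Python) =====
-- def assign_nums(classes):
--     # dict-free closed form: the label of c is the number of distinct
--     # values that appear strictly before c's first occurrence
--     return [len(set(classes[:classes.index(c)])) for c in classes]
-- ===== Notes on version B (the rewrite author's own statement) =====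
-- stated objective: alternative
-- what changed: Replaces the stateful dict-growing loop with a dict-free per-element closed form: the label of c is len(set(classes[:classes.index(c)])), the number of distinct values preceding c's first occurrence; trades A's O(n) single pass for a quadratic but stateless formulation.
import Mathlib
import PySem

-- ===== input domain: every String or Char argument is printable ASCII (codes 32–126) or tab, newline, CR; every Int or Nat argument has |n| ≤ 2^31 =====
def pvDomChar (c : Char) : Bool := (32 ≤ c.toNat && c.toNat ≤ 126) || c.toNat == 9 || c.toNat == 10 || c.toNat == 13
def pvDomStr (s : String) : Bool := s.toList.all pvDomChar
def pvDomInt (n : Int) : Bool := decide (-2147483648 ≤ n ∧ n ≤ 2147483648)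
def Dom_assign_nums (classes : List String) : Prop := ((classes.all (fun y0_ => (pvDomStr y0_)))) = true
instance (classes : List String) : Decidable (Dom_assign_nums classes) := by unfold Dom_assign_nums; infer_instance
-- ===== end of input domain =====

-- B replaces A's stateful dict-growing loop with a dict-free per-element closed form
-- (label of c = number of distinct values before c's first occurrence); alternative structure, not faster.


-- ===== PORT A =====
-- one pass: dict, output list and counter carried together, exactly as A's loop
def assignNumsStepA (st : PySem.Dict String Int × List Int × Int) (c : String) :
    PySem.Dict String Int × List Int × Int :=
  let d := st.1
  let acc := st.2.1
  let num := st.2.2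
  if d.contains c = false then
    let d' := d.insert c num
    -- class_to_num[c]: the key is present here, so Python's d[c] returns; getD is exact
    (d', acc ++ [d'.getD c 0], num + 1)
  else
    (d, acc ++ [d.getD c 0], num)

def assign_nums (classes : List String) : List Int :=
  (classes.foldl assignNumsStepA (PySem.Dict.empty, [], 0)).2.1

-- ===== PORT B =====
def assign_nums_alt (classes : List String) : List Int :=
  classes.map (fun c =>
    -- classes.index(c): c is drawn from classes, so index returns; getD is exact
    let k : Nat := (PySem.List.index? classes c).getD 0
    -- len(set(classes[:k]))
    PySem.Set.len (PySem.Set.ofList (PySem.List.slice classes none (some (k : Int)))))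

-- ===== PRECONDITION & SPEC =====
def Spec_assign_nums (classes : List String) (out : List Int) : Prop := out = assign_nums_alt classes
instance (classes : List String) (out : List Int) : Decidable (Spec_assign_nums classes out) := by unfold Spec_assign_nums; infer_instance

-- ===== CLAIM (what is proved, stated in full; the proofs are below) =====
def Claim_equal_assign_nums : Prop := ∀ (classes : List String), Dom_assign_nums classes → Spec_assign_nums classes (assign_nums classes)

-- ===== LEMMAS AND PROOFS =====

-- Set.update only appends: the old set is a prefix of the updated one
lemma update_prefix (l : List String) (s : List String) :
    s <+: PySem.Set.update s l := by
  induction l generalizing s with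
  | nil => exact List.prefix_refl s
  | cons c t ih =>
    have h := ih (PySem.Set.add s c)
    have hs : s <+: PySem.Set.add s c := by
      simp only [PySem.Set.add]
      split
      · exact List.prefix_refl s
      · exact List.prefix_append s [c]
    calc s <+: PySem.Set.add s c := hs
      _ <+: PySem.Set.update (PySem.Set.add s c) t := h

-- indices of already-seen elements are stable under Set.update
lemma idxOf_update_of_mem (l : List String) (s : List String) (c : String) (hc : c ∈ s) :
    (PySem.Set.update s l).idxOf c = s.idxOf c := by
  obtain ⟨r, hr⟩ := update_prefix l s
  rw [← hr, List.idxOf_append_of_mem hc]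

-- the loop invariant for A's single pass: d maps each seen class to its first-seen index,
-- num counts the seen classes, and the output grows by the final index of each element
lemma loopA_eq (l : List String) (seen : List String) (d : PySem.Dict String Int)
    (acc : List Int)
    (hcont : ∀ c, d.contains c = decide (c ∈ seen))
    (hget : ∀ c ∈ seen, d.getD c 0 = (seen.idxOf c : Int)) :
    (l.foldl assignNumsStepA (d, acc, (seen.length : Int))).2.1
      = acc ++ l.map (fun c => ((PySem.Set.update seen l).idxOf c : Int)) := by
  induction l generalizing seen d acc with
  | nil => simp [PySem.Set.update]
  | cons c t ih =>
    by_cases hc : c ∈ seen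
    · have hadd : PySem.Set.add seen c = seen := by
        simp [PySem.Set.add, PySem.Set.contains, hc]
      have hup : PySem.Set.update seen (c :: t) = PySem.Set.update seen t := by
        simp [PySem.Set.update, hadd]
      have hstep : assignNumsStepA (d, acc, (seen.length : Int)) c
          = (d, acc ++ [d.getD c 0], (seen.length : Int)) := by
        simp [assignNumsStepA, hcont c, hc]
      rw [List.foldl_cons, hstep, ih seen d _ hcont hget, hget c hc, hup]
      simp [idxOf_update_of_mem t seen c hc]
    · have hadd : PySem.Set.add seen c = seen ++ [c] := by
        simp [PySem.Set.add, PySem.Set.contains, hc]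
      have hup : PySem.Set.update seen (c :: t) = PySem.Set.update (seen ++ [c]) t := by
        simp [PySem.Set.update, hadd]
      have hidxc : (seen ++ [c]).idxOf c = seen.length := by
        rw [List.idxOf_append_of_notMem hc]; simp
      have hstep : assignNumsStepA (d, acc, (seen.length : Int)) c
          = (d.insert c (seen.length : Int), acc ++ [(seen.length : Int)],
             (seen.length : Int) + 1) := by
        simp [assignNumsStepA, hcont c, hc, PySem.Dict.getD_insert_self]
      have hcont' : ∀ x, (d.insert c (seen.length : Int)).contains x
          = decide (x ∈ seen ++ [c]) := by
        intro x
        rw [PySem.Dict.contains_insert, hcont x]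
        by_cases hx : x = c <;> simp [hx]
      have hget' : ∀ x ∈ seen ++ [c],
          (d.insert c (seen.length : Int)).getD x 0 = ((seen ++ [c]).idxOf x : Int) := by
        intro x hxmem
        by_cases hx : x = c
        · subst hx
          rw [PySem.Dict.getD_insert_self, hidxc]
        · have hxs : x ∈ seen := by
            rcases List.mem_append.mp hxmem with h | h
            · exact h
            · simp at h; exact absurd h hx
          rw [PySem.Dict.getD_insert_of_ne d _ _ hx, hget x hxs,
            List.idxOf_append_of_mem hxs]
      have hlen : (seen.length : Int) + 1 = ((seen ++ [c]).length : Int) := by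
        simp
      rw [List.foldl_cons, hstep, hlen, ih (seen ++ [c]) _ _ hcont' hget', hup]
      have hcidx : (PySem.Set.update (seen ++ [c]) t).idxOf c = seen.length := by
        rw [idxOf_update_of_mem t (seen ++ [c]) c (by simp), hidxc]
      simp [hcidx]

-- B's closed form: for c ∈ l with c ∉ s, the first-seen index of c in the running set
-- equals the number of distinct values accumulated up to c's first occurrence
lemma idxOf_update_eq_len_take (l : List String) (s : List String) (c : String)
    (k : Nat) (hk : PySem.List.index? l c = some k) (hs : c ∉ s) :
    (PySem.Set.update s l).idxOf c = (PySem.Set.update s (l.take k)).length := by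
  obtain ⟨pre, suf, hdec, hlen, hpre⟩ := (PySem.List.index?_eq_some_iff l c k).mp hk
  subst hdec; subst hlen
  have htake : (pre ++ c :: suf).take pre.length = pre := List.take_left
  rw [htake]
  have hs' : c ∉ PySem.Set.update s pre := by
    intro h
    rcases (PySem.Set.mem_update _ _ _).mp h with h | h
    · exact hs h
    · exact hpre h
  have hsplit : PySem.Set.update s (pre ++ c :: suf)
      = PySem.Set.update (PySem.Set.update s pre ++ [c]) suf := by
    rw [PySem.Set.update_append, PySem.Set.update_cons, PySem.Set.add_of_not_mem hs']
  rw [hsplit, idxOf_update_of_mem suf _ c (by simp),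
    List.idxOf_append_of_notMem hs']
  simp

-- ===== VERDICT (by name: the statement is the Claim_ definition above) =====
theorem assign_nums_spec : Claim_equal_assign_nums := by
  intro classes _
  show assign_nums classes = assign_nums_alt classes
  have hA : assign_nums classes
      = classes.map (fun c => ((PySem.Set.update [] classes).idxOf c : Int)) := by
    have h := loopA_eq classes [] PySem.Dict.empty []
      (fun c => by simp [PySem.Dict.contains_empty])
      (fun c hc => absurd hc (List.not_mem_nil))
    simp only [assign_nums]; simpa using h
  rw [hA]
  simp only [assign_nums_alt]
  refine List.map_congr_left ?_
  intro c hcmem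
  obtain ⟨k, hk⟩ := Option.isSome_iff_exists.mp
    ((PySem.List.index?_isSome_iff classes c).mpr hcmem)
  rw [hk]
  simp only [Option.getD_some, PySem.List.slice_to_natCast, PySem.Set.len]
  rw [idxOf_update_eq_len_take classes [] c k hk (List.not_mem_nil),
    PySem.Set.update_nil_left]
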